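-- pv_equiv track=rewrite | github.com/daniel-reich/ubiquitous-fiesta | 8xwqLZuTAsLpNSPEn_16.py | award_prizes
-- ===== SOURCE A (Python) =====
-- def award_prizes(names):
--     placing = {
--         0: "Gold",
--         1: "Silver",
--         2: "Bronze"
--     }
--     sorted_names = sorted(names.items(), key=lambda x: x[1], reverse=True)
--     return {item[0]: placing.get(i, "Participation") for i, item in enumerate(sorted_names)}
-- ===== SOURCE B (Python) =====
-- def award_prizes(names):
--     # Maintain a descending ranked list, placing each entry by hand-rolled binary
--     # search (ties land after earlier equals, keeping dict order), then pair the
--     # ranked names with a precomputed medal list.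
--     ranked = []
--     for item in names.items():
--         lo, hi = 0, len(ranked)
--         while lo < hi:
--             mid = (lo + hi) // 2
--             if ranked[mid][1] >= item[1]:
--                 lo = mid + 1
--             else:
--                 hi = mid
--         ranked.insert(lo, item)
--     medals = ["Gold", "Silver", "Bronze"] + ["Participation"] * len(ranked)
--     return dict(zip((name for name, _ in ranked), medals))
-- ===== Notes on version B (the rewrite author's own statement) =====
-- stated objective: alternative
-- what changed: B replaces the builtin reverse sort plus enumerate/placing.get dict comprehension with a hand-maintained descending ranked list built by binary-search insertion and a dict built by zipping names against a precomputed medal list.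
import Mathlib
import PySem

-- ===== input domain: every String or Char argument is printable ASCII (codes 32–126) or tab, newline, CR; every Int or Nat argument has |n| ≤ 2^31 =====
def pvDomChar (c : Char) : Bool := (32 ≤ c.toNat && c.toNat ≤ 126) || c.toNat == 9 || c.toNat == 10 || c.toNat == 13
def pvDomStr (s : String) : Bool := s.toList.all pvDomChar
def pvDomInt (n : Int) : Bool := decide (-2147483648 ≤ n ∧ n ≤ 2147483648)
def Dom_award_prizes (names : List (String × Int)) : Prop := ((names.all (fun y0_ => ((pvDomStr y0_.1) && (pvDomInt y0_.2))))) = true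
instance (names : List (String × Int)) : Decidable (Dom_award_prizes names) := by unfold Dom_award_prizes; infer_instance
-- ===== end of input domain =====

-- B replaces builtin sorted(reverse=True) + enumerate/placing.get with a hand-maintained
-- descending ranked list (binary-search insertion) zipped against a precomputed medal list
-- (objective: alternative).


-- ===== PORT A =====
def award_prizes (names : List (String × Int)) : List (String × String) :=
  let placing : PySem.Dict Int String :=
    (((⟨[]⟩ : PySem.Dict Int String).insert 0 "Gold").insert 1 "Silver").insert 2 "Bronze"
  let sorted_names := PySem.List.sorted names (fun x => x.2) true
  ((PySem.List.enumerate sorted_names 0).foldl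
      (fun d p => d.insert p.2.1 (placing.getD p.1 "Participation"))
      (⟨[]⟩ : PySem.Dict String String)).items

-- ===== PORT B =====
-- B's 'while lo < hi' binary search; lo, hi are the nonnegative Python ints of Source B,
-- kept as Nat (Python's (lo+hi)//2 on nonnegatives is Nat division); ranked[mid]
-- (always in range here) is getD with an irrelevant default.
def bsearch (ranked : List (String × Int)) (x : Int) (lo hi : Nat) : Nat :=
  if _h : lo < hi then
    let mid := (lo + hi) / 2
    if (ranked.getD mid ("", 0)).2 ≥ x then bsearch ranked x (mid + 1) hi
    else bsearch ranked x lo mid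
  else lo
termination_by hi - lo
decreasing_by all_goals omega

def award_prizes_alt (names : List (String × Int)) : List (String × String) :=
  let ranked := names.foldl
    (fun acc item => PySem.List.insert acc ((bsearch acc item.2 0 acc.length : Nat) : Int) item) []
  let medals := ["Gold", "Silver", "Bronze"] ++ List.replicate ranked.length "Participation"
  ((List.zip (ranked.map (fun p => p.1)) medals).foldl
      (fun d p => d.insert p.1 p.2)
      (⟨[]⟩ : PySem.Dict String String)).items

-- ===== PRECONDITION & SPEC =====
def Spec_award_prizes (names : List (String × Int)) (out : List (String × String)) : Prop := out = award_prizes_alt names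
instance (names : List (String × Int)) (out : List (String × String)) : Decidable (Spec_award_prizes names out) := by unfold Spec_award_prizes; infer_instance

-- ===== CLAIM (what is proved, stated in full; the proofs are below) =====
def Claim_equal_award_prizes : Prop := ∀ (names : List (String × Int)), Dom_award_prizes names → Spec_award_prizes names (award_prizes names)

-- ===== LEMMAS AND PROOFS =====

-- insertBy inserts at the first index whose element satisfies `before x ·`
lemma insertBy_eq_take_drop (before : (String × Int) → (String × Int) → Bool)
    (x : String × Int) (l : List (String × Int)) :
    PySem.List.insertBy before x l
      = l.take (l.findIdx (before x)) ++ x :: l.drop (l.findIdx (before x)) := by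
  induction l with
  | nil => rfl
  | cons y ys ih =>
    by_cases hy : before x y
    · simp [PySem.List.insertBy, hy, List.findIdx_cons]
    · simp [PySem.List.insertBy, hy, List.findIdx_cons, ih]

-- on a list descending in the score, B's binary search finds the first index with score < x
lemma bsearch_eq_findIdx (l : List (String × Int)) (x : Int)
    (hs : l.Pairwise (fun a b => b.2 ≤ a.2)) :
    ∀ n lo hi, hi - lo = n → lo ≤ hi → hi ≤ l.length →
      (∀ i, i < lo → ∀ h : i < l.length, x ≤ l[i].2) →
      (∀ i, hi ≤ i → ∀ h : i < l.length, l[i].2 < x) →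
      bsearch l x lo hi = l.findIdx (fun y => decide (y.2 < x)) := by
  have hdesc := List.pairwise_iff_getElem.mp hs
  intro n
  induction n using Nat.strong_induction_on with
  | _ n ih =>
    intro lo hi hn hlohi hhile hlo hhi
    rw [bsearch]
    by_cases h : lo < hi
    · have hmidlt : (lo + hi) / 2 < hi := by omega
      have hmidge : lo ≤ (lo + hi) / 2 := by omega
      have hmidlen : (lo + hi) / 2 < l.length := by omega
      rw [dif_pos h]
      have hget : l.getD ((lo + hi) / 2) ("", 0) = l[(lo + hi) / 2] :=
        List.getD_eq_getElem l ("", 0) hmidlen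
      by_cases hc : (l.getD ((lo + hi) / 2) ("", 0)).2 ≥ x
      · rw [if_pos hc]
        refine ih (hi - ((lo + hi) / 2 + 1)) (by omega) ((lo + hi) / 2 + 1) hi (by omega)
          (by omega) hhile ?_ hhi
        intro i hilt hlen
        have : l[(lo + hi) / 2].2 ≤ l[i].2 := by
          rcases Nat.lt_or_ge i ((lo + hi) / 2) with hlt | hge
          · exact hdesc i ((lo + hi) / 2) hlen hmidlen hlt
          · have : i = (lo + hi) / 2 := by omega
            simp [this]
        rw [hget] at hc
        omega
      · rw [if_neg hc]
        refine ih ((lo + hi) / 2 - lo) (by omega) lo ((lo + hi) / 2) (by omega)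
          (by omega) (by omega) hlo ?_
        intro i hile hlen
        have : l[i].2 ≤ l[(lo + hi) / 2].2 := by
          rcases Nat.lt_or_ge ((lo + hi) / 2) i with hlt | hge
          · exact hdesc ((lo + hi) / 2) i hmidlen hlen hlt
          · have : i = (lo + hi) / 2 := by omega
            simp [this]
        rw [hget] at hc
        omega
    · rw [dif_neg h]
      have hlohi' : lo = hi := by omega
      -- lo = hi pinned to the findIdx by the two invariants
      set F := l.findIdx (fun y => decide (y.2 < x)) with hF
      have hFle : F ≤ l.length := List.findIdx_le_length
      rcases Nat.lt_trichotomy lo F with hlt | heq | hgt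
      · -- lo < F: but l[lo].2 < x by the hi-invariant, contradicting not_of_lt_findIdx
        have hlen : lo < l.length := by omega
        have := List.not_of_lt_findIdx (p := fun y => decide (y.2 < x)) (xs := l) (i := lo) hlt
        have hval := hhi lo (by omega) hlen
        simp at this
        omega
      · exact heq
      · -- F < lo: l[F].2 ≥ x by the lo-invariant, contradicting findIdx_getElem
        have hlen : F < l.length := by omega
        have := List.findIdx_getElem (p := fun y => decide (y.2 < x)) (xs := l) (w := hlen)
        have hval := hlo F (by omega) hlen
        simp at this
        have h2 : l[F].2 < x := this
        omega

-- one B insertion step on a descending accumulator is exactly one insertBy step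
lemma binsert_eq_insertBy (acc : List (String × Int)) (x : String × Int)
    (hs : acc.Pairwise (fun a b => b.2 ≤ a.2)) :
    PySem.List.insert acc ((bsearch acc x.2 0 acc.length : Nat) : Int) x
      = PySem.List.insertBy (fun a b => decide (b.2 < a.2)) x acc := by
  have hb : bsearch acc x.2 0 acc.length = acc.findIdx (fun y => decide (y.2 < x.2)) :=
    bsearch_eq_findIdx acc x.2 hs acc.length 0 acc.length rfl (Nat.zero_le _) le_rfl
      (by intro i hi _; omega) (by intro i hle h; omega)
  rw [hb, PySem.List.insert_natCast acc _ x List.findIdx_le_length,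
    insertBy_eq_take_drop]

lemma ranked_eq_sorted (names : List (String × Int)) :
    names.foldl
        (fun acc item => PySem.List.insert acc ((bsearch acc item.2 0 acc.length : Nat) : Int) item) []
      = PySem.List.sorted names (fun x => x.2) true := by
  induction names using List.reverseRecOn with
  | nil => rfl
  | append_singleton ns x ih =>
    rw [List.foldl_append, List.foldl_cons, List.foldl_nil, ih]
    conv_rhs => rw [PySem.List.sorted_rev_eq_foldl_insertBy, List.foldl_append,
      List.foldl_cons, List.foldl_nil, ← PySem.List.sorted_rev_eq_foldl_insertBy]
    exact binsert_eq_insertBy _ x (PySem.List.sorted_pairwise_rev ns (fun p => p.2))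

lemma zip_medals (s : List (String × Int)) :
    List.zip (s.map (fun p => p.1))
        (["Gold", "Silver", "Bronze"] ++ List.replicate s.length "Participation")
      = (PySem.List.enumerate s 0).map (fun p =>
          (p.2.1,
           ((((⟨[]⟩ : PySem.Dict Int String).insert 0 "Gold").insert 1 "Silver").insert 2 "Bronze").getD
             p.1 "Participation")) := by
  apply List.ext_getElem
  · simp [PySem.List.length_enumerate]
    omega
  · intro j h1 h2
    simp only [List.getElem_zip, List.getElem_map, PySem.List.getElem_enumerate]
    congr 1
    match j with
    | 0 => rfl
    | 1 => rfl
    | 2 => rfl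
    | (n+3) =>
      rw [List.getElem_append_right (by simp)]
      simp only [List.getElem_replicate, PySem.Dict.getD, PySem.Dict.get?, PySem.Dict.insert,
        PySem.Dict.contains]
      simp
      have hn : List.find? (fun p => p.1 == (n:Int)+3)
          [((0:Int),"Gold"),(1,"Silver"),(2,"Bronze")] = none := by
        rw [List.find?_eq_none]
        intro x hx
        fin_cases hx <;> simp <;> omega
      rw [hn]
      rfl

-- ===== VERDICT (by name: the statement is the Claim_ definition above) =====
theorem award_prizes_spec : Claim_equal_award_prizes := by
  intro names _
  unfold Spec_award_prizes award_prizes award_prizes_alt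
  dsimp only
  rw [ranked_eq_sorted, zip_medals, List.foldl_map]
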